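-- pv_equiv track=rewrite | github.com/HafizMustafa7/YT-Agent | backend/app/services/video_service.py | _calculate_segments
-- ===== SOURCE A (Python) =====
-- from typing import List, Dict, Any, Optional, Tuple
--
-- VEO_MAX_GENERATE_SECONDS = 30
--
-- VEO_EXTEND_SECONDS = 7
--
-- def _calculate_segments(duration_seconds: int) -> List[int]:
--     """
--     Break a target duration into Veo-compatible segments.
--     - Segment 0 (text-to-video): up to VEO_MAX_GENERATE_SECONDS (30s).
--     - Segment 1+ (extend):       always VEO_EXTEND_SECONDS (7s) per call.
--     The total may slightly exceed the requested duration (unavoidable with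
--     fixed 7s extension chunks). That is acceptable — the final FFmpeg stitch
--     contains exactly the content generated.
--     """
--     if duration_seconds <= VEO_MAX_GENERATE_SECONDS:
--         return [duration_seconds]
--
--     segments = [VEO_MAX_GENERATE_SECONDS]
--     remaining = duration_seconds - VEO_MAX_GENERATE_SECONDS
--     while remaining > 0:
--         segments.append(VEO_EXTEND_SECONDS)
--         remaining -= VEO_EXTEND_SECONDS
--
--     return segments
-- ===== SOURCE B (Python) =====
-- VEO_MAX_GENERATE_SECONDS = 30
--
-- VEO_EXTEND_SECONDS = 7
--
-- def _calculate_segments(duration_seconds: int):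
--     if duration_seconds <= VEO_MAX_GENERATE_SECONDS:
--         return [duration_seconds]
--     count = -((VEO_MAX_GENERATE_SECONDS - duration_seconds) // VEO_EXTEND_SECONDS)
--     return [VEO_MAX_GENERATE_SECONDS] + [VEO_EXTEND_SECONDS] * count
-- ===== Notes on version B (the rewrite author's own statement) =====
-- stated objective: simpler
-- what changed: Replaces the subtract-until-zero loop with a closed-form ceiling division computing the number of 7s extensions, then builds the list with replication.
import Mathlib
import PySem

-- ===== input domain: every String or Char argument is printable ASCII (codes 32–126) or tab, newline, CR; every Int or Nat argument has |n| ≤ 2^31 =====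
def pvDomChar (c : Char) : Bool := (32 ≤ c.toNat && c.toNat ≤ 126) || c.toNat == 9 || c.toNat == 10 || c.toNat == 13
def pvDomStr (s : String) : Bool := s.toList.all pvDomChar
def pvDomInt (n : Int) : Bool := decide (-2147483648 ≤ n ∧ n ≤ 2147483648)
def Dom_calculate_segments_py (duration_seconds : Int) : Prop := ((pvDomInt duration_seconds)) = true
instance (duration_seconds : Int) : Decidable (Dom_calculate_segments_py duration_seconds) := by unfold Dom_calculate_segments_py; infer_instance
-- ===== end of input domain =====

-- B replaces A's subtract-until-zero loop with a closed-form ceiling division (simpler); same return value.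

-- ===== PORT A =====
-- the 'while remaining > 0' loop of A, carrying (segments, remaining)
def pvLoopA (segments : List Int) (remaining : Int) : List Int :=
  if remaining > 0 then pvLoopA (segments ++ [7]) (remaining - 7) else segments
termination_by remaining.toNat
decreasing_by omega

def calculate_segments_py (duration_seconds : Int) : List Int :=
  if duration_seconds ≤ 30 then [duration_seconds]
  else pvLoopA [30] (duration_seconds - 30)

-- ===== PORT B =====
def calculate_segments_py_alt (duration_seconds : Int) : List Int :=
  if duration_seconds ≤ 30 then [duration_seconds]
  else
    let count : Int := -(PySem.Int.floordiv (30 - duration_seconds) 7)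
    [30] ++ List.replicate count.toNat 7

-- ===== PRECONDITION & SPEC =====
def Spec_calculate_segments_py (duration_seconds : Int) (out : List Int) : Prop := out = calculate_segments_py_alt duration_seconds
instance (duration_seconds : Int) (out : List Int) : Decidable (Spec_calculate_segments_py duration_seconds out) := by unfold Spec_calculate_segments_py; infer_instance

-- ===== CLAIM (what is proved, stated in full; the proofs are below) =====
def Claim_equal_calculate_segments_py : Prop := ∀ (duration_seconds : Int), Dom_calculate_segments_py duration_seconds → Spec_calculate_segments_py duration_seconds (calculate_segments_py duration_seconds)

-- ===== LEMMAS AND PROOFS =====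

-- A's loop appends exactly ⌈r/7⌉ sevens (as -((-r)//7), 0 when r ≤ 0)
theorem pvLoopA_eq (n : Nat) : ∀ (r : Int) (acc : List Int), r.toNat ≤ n →
    pvLoopA acc r = acc ++ List.replicate (-((-r) / 7)).toNat 7 := by
  induction n with
  | zero =>
    intro r acc h
    rw [pvLoopA]
    have hr : ¬ r > 0 := by omega
    have : (-((-r) / 7)).toNat = 0 := by omega
    simp [hr, this]
  | succ n ih =>
    intro r acc h
    rw [pvLoopA]
    by_cases hr : r > 0
    · rw [if_pos hr, ih (r - 7) (acc ++ [7]) (by omega)]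
      have hk : (-((-r) / 7)).toNat = (-((-(r - 7)) / 7)).toNat + 1 := by omega
      rw [hk]
      simp [List.replicate_succ]
    · have : (-((-r) / 7)).toNat = 0 := by omega
      simp [hr, this]

-- ===== VERDICT (by name: the statement is the Claim_ definition above) =====
theorem calculate_segments_py_spec : Claim_equal_calculate_segments_py := by
  intro d _
  unfold Spec_calculate_segments_py calculate_segments_py calculate_segments_py_alt
  by_cases hd : d ≤ 30
  · simp [hd]
  · rw [if_neg hd, if_neg hd,
      pvLoopA_eq (d - 30).toNat (d - 30) [30] (le_refl _),
      PySem.Int.floordiv_eq_ediv_of_pos (by omega)]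
    have : -(d - 30) = 30 - d := by ring
    rw [this]
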